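-- pv_equiv track=rewrite | github.com/k3nj115h1kawa/AtCoder-s_My_answers | AtCoder_Beginners_Selection/ABC049C.py | judge_loop
-- ===== SOURCE A (Python) =====
-- def fit_judge(line, fit_line):
--     judgment = True
--     if len(line) < len(fit_line):
--         judgment = False
--         return judgment
--     for i in range(1, len(fit_line)+1):
--         if line[-i] != fit_line[-i]:
--             judgment = False
--             break
--     return judgment
--
-- def judge_loop(line, fit_list):
--     msg = 'YES'
--     while len(line) > 0:
--         valid_idx = 0  # 文字列が該当する部分があるときの, fit_listのインデックス
--         judgment_result_idx = [i for i in range(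
--             len(fit_list)) if fit_judge(line, fit_list[i]) == True]
--         if len(judgment_result_idx) == 0 and len(line) > 0:
--             msg = 'NO'
--             return msg
--         elif len(judgment_result_idx) > 0:
--             valid_idx = judgment_result_idx[-1]   # リスト内で最後の部分を選択
--             line = line[:-len(fit_list[valid_idx])]  # 該当する部分の文字列削除
--     return msg
-- ===== SOURCE B (Python) =====
-- def judge_loop(line, fit_list):
--     words = list(reversed(fit_list))
--     pos = len(line)
--     while pos > 0:
--         for w in words:
--             n = len(w)
--             if n <= pos and line[pos - n:pos] == w:
--                 pos -= n
--                 break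
--         else:
--             return 'NO'
--     return 'YES'
-- ===== Notes on version B (the rewrite author's own statement) =====
-- stated objective: faster
-- what changed: B walks an index pointer backwards over the original string and scans the reversed word list for a suffix match at the pointer, instead of building an index-comprehension over the whole word list and materialising a new sliced string at every step.
-- outside the precondition, e.g. on judge_loop('ab', ['']): A returns 'YES', B does not finish within the time limit
import Mathlib
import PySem

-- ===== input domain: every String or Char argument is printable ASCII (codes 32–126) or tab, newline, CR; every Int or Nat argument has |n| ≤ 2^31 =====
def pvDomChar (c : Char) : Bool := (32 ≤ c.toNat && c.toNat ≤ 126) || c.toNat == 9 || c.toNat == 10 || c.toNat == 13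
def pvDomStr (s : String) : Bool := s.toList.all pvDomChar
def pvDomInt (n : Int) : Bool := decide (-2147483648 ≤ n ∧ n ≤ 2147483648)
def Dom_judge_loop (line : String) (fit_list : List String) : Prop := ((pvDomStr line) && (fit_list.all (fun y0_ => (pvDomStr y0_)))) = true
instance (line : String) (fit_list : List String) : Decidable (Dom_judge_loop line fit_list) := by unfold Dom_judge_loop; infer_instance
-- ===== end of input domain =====

-- B replaces A's repeated string slicing and index-comprehension by a backward index
-- pointer over the original string (objective: faster).

-- ===== PORT A =====
-- fit_judge's inner for-loop with break: checks line[-i] == fit_line[-i] for each i drawn from the range list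
def pvFitLoop (line fit : List Char) : List Int → Bool
  | [] => true
  | i :: rest =>
    if PySem.List.pyGet? line (-i) ≠ PySem.List.pyGet? fit (-i) then false
    else pvFitLoop line fit rest

-- fit_judge(line, fit_line)
def pvFitJudge (line fit : List Char) : Bool :=
  if line.length < fit.length then false
  else pvFitLoop line fit (PySem.List.pyRange 1 ((fit.length : Int) + 1) 1)

-- judge_loop's while-loop; fuel = initial length + 1 is an upper bound on the number of
-- iterations (each step strictly shortens line), a totality guard only
def pvJudgeA (fits : List (List Char)) : Nat → List Char → String
  | 0, _ => "YES"
  | fuel + 1, line =>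
    if line.length > 0 then
      let idxs := (PySem.List.pyRange 0 (fits.length : Int) 1).filter
          (fun i => pvFitJudge line ((PySem.List.pyGet? fits i).getD []) == true)
      if idxs.length = 0 then "NO"
      else
        let validIdx := (PySem.List.pyGet? idxs (-1)).getD 0      -- judgment_result_idx[-1]
        let w := (PySem.List.pyGet? fits validIdx).getD []        -- fit_list[valid_idx]
        pvJudgeA fits fuel (PySem.List.slice line none (some (-(w.length : Int))))  -- line[:-len(...)]
    else "YES"

def judge_loop (line : String) (fit_list : List String) : String :=
  pvJudgeA (fit_list.map String.toList) (line.toList.length + 1) line.toList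

-- ===== PORT B =====
-- the inner for/else of Source B: first w in words with n <= pos and line[pos-n:pos] == w
def pvFindFit (line : List Char) (pos : Nat) : List (List Char) → Option (List Char)
  | [] => none
  | w :: ws =>
    if decide (w.length ≤ pos) &&
        (PySem.List.slice line (some ((pos : Int) - (w.length : Int))) (some (pos : Int)) == w)
    then some w else pvFindFit line pos ws

-- the while-loop of Source B over the pointer pos; fuel is a totality guard only
-- (under Pre_ every word is nonempty, so pos strictly decreases and fuel = pos + 1 suffices)
def pvJudgeB (line : List Char) (words : List (List Char)) : Nat → Nat → String
  | 0, _ => "YES"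
  | fuel + 1, pos =>
    if pos > 0 then
      match pvFindFit line pos words with
      | none => "NO"
      | some w => pvJudgeB line words fuel (pos - w.length)
    else "YES"

def judge_loop_alt (line : String) (fit_list : List String) : String :=
  pvJudgeB line.toList (fit_list.map String.toList).reverse (line.toList.length + 1) line.toList.length

-- ===== PRECONDITION & SPEC =====
-- Pre_ excludes word lists containing the empty string: there A's slicing line[:-0] silently
-- clears the WHOLE line (a -0 slicing artefact) and A returns 'YES', while B's pointer loop
-- does not terminate.
def Pre_judge_loop (line : String) (fit_list : List String) : Prop := "" ∉ fit_list
instance (line : String) (fit_list : List String) : Decidable (Pre_judge_loop line fit_list) := by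
  unfold Pre_judge_loop; infer_instance

def pvWitness_judge_loop : String × List String :=
  ("erasedream", ["dream", "dreamer", "erase", "eraser"])

def Spec_judge_loop (line : String) (fit_list : List String) (out : String) : Prop := out = judge_loop_alt line fit_list
instance (line : String) (fit_list : List String) (out : String) : Decidable (Spec_judge_loop line fit_list out) := by unfold Spec_judge_loop; infer_instance

-- ===== CLAIM (what is proved, stated in full; the proofs are below) =====
def Claim_equal_judge_loop : Prop := ∀ (line : String) (fit_list : List String), Dom_judge_loop line fit_list → Pre_judge_loop line fit_list → Spec_judge_loop line fit_list (judge_loop line fit_list)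

-- ===== LEMMAS AND PROOFS =====

-- B's per-word match test, as a predicate
def pvMatchB (L : List Char) (pos : Nat) (w : List Char) : Bool :=
  decide (w.length ≤ pos) &&
    (PySem.List.slice L (some ((pos : Int) - (w.length : Int))) (some (pos : Int)) == w)

theorem pvFindFit_eq_find? (L : List Char) (pos : Nat) (ws : List (List Char)) :
    pvFindFit L pos ws = ws.find? (pvMatchB L pos) := by
  induction ws with
  | nil => rfl
  | cons w ws ih =>
    simp only [pvFindFit, pvMatchB, List.find?]
    split_ifs with h <;> simp [h, ih]

theorem pvFitLoop_eq_all (line fit : List Char) (l : List Int) :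
    pvFitLoop line fit l =
      l.all (fun i => PySem.List.pyGet? line (-i) == PySem.List.pyGet? fit (-i)) := by
  induction l with
  | nil => rfl
  | cons i rest ih =>
    simp only [pvFitLoop, List.all_cons]
    split_ifs with h
    · simp [h]
    · simp only [ne_eq, not_not] at h
      simp [h, ih]

-- the inner loop over i = 1..m checks exactly "fit is the last m characters of u"
theorem pvFitLoop_suffix (u fit : List Char) (h : fit.length ≤ u.length) :
    pvFitLoop u fit (PySem.List.pyRange 1 ((fit.length : Int) + 1) 1) =
      decide (u.drop (u.length - fit.length) = fit) := by
  rw [pvFitLoop_eq_all, Bool.eq_iff_iff]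
  simp only [List.all_eq_true, beq_iff_eq, decide_eq_true_eq]
  constructor
  · intro h
    apply List.ext_getElem?
    intro n
    by_cases hn : n < fit.length
    · have hmem : ((fit.length - n : Nat) : Int) ∈ PySem.List.pyRange 1 ((fit.length : Int) + 1) 1 := by
        rw [PySem.List.mem_pyRange_one]; omega
      have hh := h _ hmem
      rw [PySem.List.pyGet?_neg_natCast u (fit.length - n) (by omega) (by omega),
          PySem.List.pyGet?_neg_natCast fit (fit.length - n) (by omega) (by omega)] at hh
      rw [List.getElem?_drop]
      have e1 : u.length - (fit.length - n) = u.length - fit.length + n := by omega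
      have e2 : fit.length - (fit.length - n) = n := by omega
      rw [e1] at hh; rw [e2] at hh
      exact hh
    · rw [List.getElem?_eq_none, List.getElem?_eq_none]
      · omega
      · simp only [List.length_drop]; omega
  · intro hdrop i hi
    rw [PySem.List.mem_pyRange_one] at hi
    obtain ⟨hi1, hi2⟩ := hi
    have hk : i = ((i.toNat : Nat) : Int) := by omega
    rw [hk, PySem.List.pyGet?_neg_natCast u i.toNat (by omega) (by omega),
        PySem.List.pyGet?_neg_natCast fit i.toNat (by omega) (by omega)]
    have hp := congrArg (fun l => l[fit.length - i.toNat]?) hdrop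
    simp only [List.getElem?_drop] at hp
    rw [← hp]
    congr 1
    omega

-- A's fit_judge on the prefix of length pos equals B's match test at pointer pos
theorem pvJudge_iff (L : List Char) (pos : Nat) (hpos : pos ≤ L.length) (fit : List Char) :
    pvFitJudge (L.take pos) fit = pvMatchB L pos fit := by
  have hlen : (L.take pos).length = pos := by simp; omega
  unfold pvFitJudge pvMatchB
  rw [hlen]
  by_cases hm : fit.length ≤ pos
  · rw [if_neg (by omega)]
    rw [pvFitLoop_suffix _ _ (by omega)]
    have e1 : ((pos : Int) - (fit.length : Int)) = ((pos - fit.length : Nat) : Int) := by omega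
    rw [e1, PySem.List.slice_natCast]
    have e2 : pos - (pos - fit.length) = fit.length := by omega
    rw [e2, hlen]
    have e2' : pos - (pos - fit.length) = fit.length := by omega
    have e3 : (L.take pos).drop (pos - fit.length) = (L.drop (pos - fit.length)).take fit.length := by
      rw [List.drop_take, e2']
    rw [e3, Bool.eq_iff_iff]
    simp [hm]
  · rw [if_pos (by omega)]
    simp [hm]

-- selection correspondence: A's "last index of the comprehension" names the same word as
-- B's "first match in the reversed list"
theorem pvSel (q : List Char → Bool) (F : List (List Char)) :
    (F.reverse.find? q = none →
      (PySem.List.pyRange 0 (F.length : Int) 1).filter (fun i => q ((PySem.List.pyGet? F i).getD [])) = []) ∧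
    (∀ w, F.reverse.find? q = some w →
      ∃ j : Nat, ∃ hj : j < F.length,
        (let idxs := (PySem.List.pyRange 0 (F.length : Int) 1).filter (fun i => q ((PySem.List.pyGet? F i).getD []))
         idxs ≠ [] ∧ (PySem.List.pyGet? idxs (-1)).getD 0 = (j : Int)) ∧
        F[j]'hj = w) := by
  induction F using List.reverseRecOn with
  | nil =>
    constructor
    · intro _
      rw [PySem.List.pyRange_one_eq_nil (by simp)]
      rfl
    · intro w hw
      simp at hw
  | append_singleton G a IH =>
    have hlen : (G ++ [a]).length = G.length + 1 := by simp
    have hsplit : PySem.List.pyRange 0 (((G ++ [a]).length : Int)) 1 =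
        PySem.List.pyRange 0 (G.length : Int) 1 ++ [(G.length : Int)] := by
      rw [hlen]
      push_cast
      exact PySem.List.pyRange_one_succ_right (by positivity)
    have hidx : ∀ i ∈ PySem.List.pyRange 0 (G.length : Int) 1,
        (PySem.List.pyGet? (G ++ [a]) i).getD [] = (PySem.List.pyGet? G i).getD [] := by
      intro i hi
      rw [PySem.List.mem_pyRange_one] at hi
      rw [PySem.List.pyGet?_of_nonneg _ hi.1, PySem.List.pyGet?_of_nonneg _ hi.1,
          List.getElem?_append_left (by omega)]
    have hrev : (G ++ [a]).reverse = a :: G.reverse := by simp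
    rw [hsplit, List.filter_append, hrev]
    cases hqa : q a with
    | true =>
      constructor
      · intro hnone
        rw [List.find?_cons, hqa] at hnone
        simp at hnone
      · intro w hw
        rw [List.find?_cons, hqa] at hw
        simp only [Option.some.injEq] at hw
        refine ⟨G.length, by omega, ?_, ?_⟩
        · constructor
          · simp [hqa]
          · have : (PySem.List.pyRange 0 (G.length : Int) 1).filter
                (fun i => q ((PySem.List.pyGet? (G ++ [a]) i).getD [])) ++
                List.filter (fun i => q ((PySem.List.pyGet? (G ++ [a]) i).getD [])) [(G.length : Int)] =
                (PySem.List.pyRange 0 (G.length : Int) 1).filter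
                (fun i => q ((PySem.List.pyGet? (G ++ [a]) i).getD [])) ++ [(G.length : Int)] := by
              simp [List.filter, hqa]
            rw [this, PySem.List.pyGet?_neg_one_append_singleton]
            rfl
        · rw [← hw]
          simp
    | false =>
      have hfilt1 : List.filter (fun i => q ((PySem.List.pyGet? (G ++ [a]) i).getD [])) [(G.length : Int)] = [] := by
        simp [List.filter, hqa]
      have hfilt2 : (PySem.List.pyRange 0 (G.length : Int) 1).filter
          (fun i => q ((PySem.List.pyGet? (G ++ [a]) i).getD [])) =
          (PySem.List.pyRange 0 (G.length : Int) 1).filter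
          (fun i => q ((PySem.List.pyGet? G i).getD [])) := by
        apply List.filter_congr
        intro i hi
        rw [hidx i hi]
      rw [hfilt1, hfilt2, List.append_nil, List.find?_cons, hqa]
      obtain ⟨ih1, ih2⟩ := IH
      constructor
      · intro hnone
        exact ih1 hnone
      · intro w hw
        obtain ⟨j, hj, hprops, hgw⟩ := ih2 w hw
        refine ⟨j, by omega, hprops, ?_⟩
        rw [List.getElem_append_left hj]
        exact hgw

theorem pvLoop_eq (fuel : Nat) : ∀ (L : List Char) (F : List (List Char)) (pos : Nat),
    [] ∉ F → pos ≤ L.length → pos < fuel →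
    pvJudgeA F fuel (L.take pos) = pvJudgeB L F.reverse fuel pos := by
  induction fuel with
  | zero => intro L F pos _ _ h; omega
  | succ fuel ih =>
    intro L F pos hne hpos hfuel
    have hlen : (L.take pos).length = pos := by simp; omega
    simp only [pvJudgeA, pvJudgeB, hlen]
    by_cases hp : pos > 0
    · rw [if_pos hp, if_pos hp]
      have hpred : (fun i => pvFitJudge (L.take pos) ((PySem.List.pyGet? F i).getD []) == true)
                 = (fun i => pvMatchB L pos ((PySem.List.pyGet? F i).getD [])) := by
        funext i
        rw [pvJudge_iff L pos hpos]
        simp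
      rw [pvFindFit_eq_find?, hpred]
      obtain ⟨hnone, hsome⟩ := pvSel (pvMatchB L pos) F
      cases hfind : F.reverse.find? (pvMatchB L pos) with
      | none =>
        rw [hnone hfind]
        rfl
      | some w =>
        obtain ⟨j, hj, ⟨hne', hlast⟩, hw⟩ := hsome w hfind
        rw [if_neg (by simpa [List.length_eq_zero_iff] using hne')]
        rw [hlast, PySem.List.pyGet?_natCast]
        have hgj : F[(j : Nat)]? = some (F[j]'hj) := List.getElem?_eq_getElem hj
        rw [hgj]
        simp only [Option.getD_some, hw]
        have hwF : w ∈ F := hw ▸ List.getElem_mem hj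
        have hk : 0 < w.length := by
          cases hw' : w with
          | nil => exact absurd (hw' ▸ hwF) hne
          | cons c cs => simp
        rw [PySem.List.slice_to_neg_natCast _ _ hk, hlen, List.take_take]
        have hmin : min (pos - w.length) pos = pos - w.length := by omega
        rw [hmin]
        exact ih L F (pos - w.length) hne (by omega) (by omega)
    · rw [if_neg hp, if_neg hp]

-- ===== VERDICT (by name: the statement is the Claim_ definition above) =====
theorem judge_loop_spec : Claim_equal_judge_loop := by
  intro line fit_list _ hpre
  unfold Spec_judge_loop judge_loop judge_loop_alt
  have hne : [] ∉ fit_list.map String.toList := by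
    intro hmem
    rcases List.mem_map.mp hmem with ⟨s, hs, hnil⟩
    have : s = "" := by
      rwa [← String.toList_inj, String.toList_empty]
    exact hpre (this ▸ hs)
  have := pvLoop_eq (line.toList.length + 1) line.toList (fit_list.map String.toList)
    line.toList.length hne le_rfl (Nat.lt_succ_self _)
  rw [List.take_length] at this
  exact this
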